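-- pv_equiv track=rewrite | github.com/goranjovic55/xdccarr | .github/scripts/stress_test.py | _get_expected_skills
-- ===== SOURCE A (Python) =====
-- from typing import List, Dict, Any, Set, Optional, Tuple
--
-- def _get_expected_skills(session_type: str, files: List[str]) -> List[str]:
--     """Get expected skills for session type."""
--     skills = []
--
--     if any('.tsx' in f or '.jsx' in f for f in files):
--         skills.append('frontend-react')
--     if any('.py' in f and 'backend' in f for f in files):
--         skills.append('backend-api')
--     if any('docker' in f.lower() or 'Dockerfile' in f for f in files):
--         skills.append('docker')
--     if any('.md' in f for f in files):
--         skills.append('documentation')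
--     if any('test' in f.lower() for f in files):
--         skills.append('testing')
--     if any('.github/skills' in f or '.github/instructions' in f for f in files):
--         skills.append('akis-dev')
--
--     return skills or ['debugging']
-- ===== SOURCE B (Python) =====
-- def _get_expected_skills(session_type, files):
--     """Get expected skills for session type (single-pass flag accumulation)."""
--     react = backend = docker = docs = testing = akis = False
--     for f in files:
--         react = react or ('.tsx' in f or '.jsx' in f)
--         backend = backend or ('.py' in f and 'backend' in f)
--         docker = docker or ('docker' in f.lower() or 'Dockerfile' in f)
--         docs = docs or ('.md' in f)
--         testing = testing or ('test' in f.lower())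
--         akis = akis or ('.github/skills' in f or '.github/instructions' in f)
--     skills = [tag for flag, tag in [
--         (react, 'frontend-react'), (backend, 'backend-api'), (docker, 'docker'),
--         (docs, 'documentation'), (testing, 'testing'), (akis, 'akis-dev')] if flag]
--     return skills or ['debugging']
-- ===== Notes on version B (the rewrite author's own statement) =====
-- stated objective: alternative
-- what changed: Replaces six separate any() scans over the file list with one pass that accumulates six boolean flags, then assembles the tag list from the flags.
import Mathlib
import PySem

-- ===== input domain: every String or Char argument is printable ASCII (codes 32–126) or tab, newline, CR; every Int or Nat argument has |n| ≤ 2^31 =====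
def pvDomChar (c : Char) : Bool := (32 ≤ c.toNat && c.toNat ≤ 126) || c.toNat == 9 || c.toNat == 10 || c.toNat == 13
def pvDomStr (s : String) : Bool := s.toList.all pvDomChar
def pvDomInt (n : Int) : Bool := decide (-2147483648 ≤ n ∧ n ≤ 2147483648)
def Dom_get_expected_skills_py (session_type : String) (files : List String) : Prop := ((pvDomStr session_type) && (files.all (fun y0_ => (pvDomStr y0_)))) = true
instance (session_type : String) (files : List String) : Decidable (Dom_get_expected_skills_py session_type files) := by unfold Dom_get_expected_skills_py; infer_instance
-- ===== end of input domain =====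

-- B replaces A's six separate any-scans over `files` with one pass accumulating six boolean flags, then assembles the tags (objective: alternative single-pass decomposition).


-- shared per-file predicates (the exact boolean tests both Pythons apply to one file)
def pvIsReact (f : String) : Bool := PySem.Str.isIn ".tsx" f || PySem.Str.isIn ".jsx" f
def pvIsBackend (f : String) : Bool := PySem.Str.isIn ".py" f && PySem.Str.isIn "backend" f
def pvIsDocker (f : String) : Bool := PySem.Str.isIn "docker" (PySem.Str.lower f) || PySem.Str.isIn "Dockerfile" f
def pvIsDocs (f : String) : Bool := PySem.Str.isIn ".md" f
def pvIsTesting (f : String) : Bool := PySem.Str.isIn "test" (PySem.Str.lower f)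
def pvIsAkis (f : String) : Bool := PySem.Str.isIn ".github/skills" f || PySem.Str.isIn ".github/instructions" f

-- ===== PORT A =====
-- A: six separate any() scans, each appending one tag; `skills or ['debugging']`
def get_expected_skills_py (session_type : String) (files : List String) : List String :=
  let skills : List String := []
  let skills := if files.any pvIsReact then skills ++ ["frontend-react"] else skills
  let skills := if files.any pvIsBackend then skills ++ ["backend-api"] else skills
  let skills := if files.any pvIsDocker then skills ++ ["docker"] else skills
  let skills := if files.any pvIsDocs then skills ++ ["documentation"] else skills
  let skills := if files.any pvIsTesting then skills ++ ["testing"] else skills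
  let skills := if files.any pvIsAkis then skills ++ ["akis-dev"] else skills
  if skills = [] then ["debugging"] else skills

-- ===== PORT B =====
-- B: one fold over files accumulating six flags by OR, then the tag list is read off the flags
def get_expected_skills_py_alt (session_type : String) (files : List String) : List String :=
  let flags := files.foldl
    (fun (s : Bool × Bool × Bool × Bool × Bool × Bool) f =>
      (s.1 || pvIsReact f, s.2.1 || pvIsBackend f, s.2.2.1 || pvIsDocker f,
       s.2.2.2.1 || pvIsDocs f, s.2.2.2.2.1 || pvIsTesting f, s.2.2.2.2.2 || pvIsAkis f))
    (false, false, false, false, false, false)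
  let skills := (([(flags.1, "frontend-react"), (flags.2.1, "backend-api"),
      (flags.2.2.1, "docker"), (flags.2.2.2.1, "documentation"),
      (flags.2.2.2.2.1, "testing"), (flags.2.2.2.2.2, "akis-dev")] :
      List (Bool × String)).filter (fun p => p.1)).map (fun p => p.2)
  if skills = [] then ["debugging"] else skills

-- ===== PRECONDITION & SPEC =====
def Spec_get_expected_skills_py (session_type : String) (files : List String) (out : List String) : Prop := out = get_expected_skills_py_alt session_type files
instance (session_type : String) (files : List String) (out : List String) : Decidable (Spec_get_expected_skills_py session_type files out) := by unfold Spec_get_expected_skills_py; infer_instance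

-- ===== CLAIM (what is proved, stated in full; the proofs are below) =====
def Claim_equal_get_expected_skills_py : Prop := ∀ (session_type : String) (files : List String), Dom_get_expected_skills_py session_type files → Spec_get_expected_skills_py session_type files (get_expected_skills_py session_type files)

-- ===== LEMMAS AND PROOFS =====
-- B's fold of six OR-updates computes exactly the six any() results
theorem pv_fold_flags (files : List String) (a b c d e g : Bool) :
    files.foldl
      (fun (s : Bool × Bool × Bool × Bool × Bool × Bool) f =>
        (s.1 || pvIsReact f, s.2.1 || pvIsBackend f, s.2.2.1 || pvIsDocker f,
         s.2.2.2.1 || pvIsDocs f, s.2.2.2.2.1 || pvIsTesting f, s.2.2.2.2.2 || pvIsAkis f))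
      (a, b, c, d, e, g)
    = (a || files.any pvIsReact, b || files.any pvIsBackend, c || files.any pvIsDocker,
       d || files.any pvIsDocs, e || files.any pvIsTesting, g || files.any pvIsAkis) := by
  induction files generalizing a b c d e g with
  | nil => simp
  | cons x xs ih => simp [List.foldl_cons, ih, Bool.or_assoc]

-- ===== VERDICT (by name: the statement is the Claim_ definition above) =====
theorem get_expected_skills_py_spec : Claim_equal_get_expected_skills_py := by
  intro session_type files _
  show get_expected_skills_py session_type files = get_expected_skills_py_alt session_type files
  unfold get_expected_skills_py get_expected_skills_py_alt
  rw [pv_fold_flags]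
  cases files.any pvIsReact <;> cases files.any pvIsBackend <;> cases files.any pvIsDocker <;>
    cases files.any pvIsDocs <;> cases files.any pvIsTesting <;> cases files.any pvIsAkis <;> rfl
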